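-- pv_equiv track=rewrite | github.com/WeijieChen2017/raw_FedFBD | aggregate_fbd_results.py | parse_folder_name
-- ===== SOURCE A (Python) =====
-- def parse_folder_name(folder_name):
--     """
--     Parse folder name divided by underscores to extract attributes.
--     Example: fbd_sim_bloodmnist_resnet18_20250702_202759
--     """
--     parts = folder_name.split('_')
--     attributes = {}
--
--     # Common pattern seems to be: fbd_<type>_<dataset>_<model>_<date>_<time>
--     # But we'll make it flexible to handle various patterns
--
--     if len(parts) >= 2:
--         attributes['prefix'] = parts[0]
--         attributes['type'] = parts[1]
--
--     # Extract remaining parts dynamically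
--     for i, part in enumerate(parts[2:], start=2):
--         attributes[f'attribute_{i-1}'] = part
--
--     # Try to identify common patterns
--     if len(parts) >= 4:
--         # Check if parts look like dataset names (common medical datasets)
--         medical_datasets = ['bloodmnist', 'organamnist', 'pathmnist', 'dermamnist',
--                           'octmnist', 'pneumoniamnist', 'retinamnist', 'tissuemnist',
--                           'organsmnist', 'organcmnist', 'breastmnist', 'chestmnist', 'siim']
--
--         # Check if parts look like model names
--         model_names = ['resnet18', 'resnet50', 'vgg16', 'densenet121', 'unet', 'mobilenet']
--
--         # Try to identify dataset
--         for i, part in enumerate(parts):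
--             if any(dataset in part.lower() for dataset in medical_datasets):
--                 attributes['dataset'] = part
--                 break
--
--         # Try to identify model
--         for i, part in enumerate(parts):
--             if any(model in part.lower() for model in model_names):
--                 attributes['model'] = part
--                 break
--
--         # Check for date pattern (YYYYMMDD)
--         for i, part in enumerate(parts):
--             if len(part) == 8 and part.isdigit():
--                 attributes['date'] = part
--                 # Check if next part is time (HHMMSS)
--                 if i + 1 < len(parts) and len(parts[i + 1]) == 6 and parts[i + 1].isdigit():
--                     attributes['time'] = parts[i + 1]
--
--     # Add the full folder name for reference
--     attributes['full_folder_name'] = folder_name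
--
--     return attributes
-- ===== SOURCE B (Python) =====
-- MEDICAL_DATASETS = ['bloodmnist', 'organamnist', 'pathmnist', 'dermamnist',
--                     'octmnist', 'pneumoniamnist', 'retinamnist', 'tissuemnist',
--                     'organsmnist', 'organcmnist', 'breastmnist', 'chestmnist', 'siim']
-- MODEL_NAMES = ['resnet18', 'resnet50', 'vgg16', 'densenet121', 'unet', 'mobilenet']
--
--
-- def parse_folder_name(folder_name):
--     parts = folder_name.split('_')
--     attributes = {}
--
--     if len(parts) >= 2:
--         attributes['prefix'] = parts[0]
--         attributes['type'] = parts[1]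
--
--     for i, part in enumerate(parts[2:], start=2):
--         attributes[f'attribute_{i-1}'] = part
--
--     if len(parts) >= 4:
--         # one traversal, keeping 'first match' / 'last date' state
--         dataset = model = date = time = None
--         for i, part in enumerate(parts):
--             low = part.lower()
--             if dataset is None and any(d in low for d in MEDICAL_DATASETS):
--                 dataset = part
--             if model is None and any(m in low for m in MODEL_NAMES):
--                 model = part
--             if len(part) == 8 and part.isdigit():
--                 date = part
--                 if i + 1 < len(parts) and len(parts[i + 1]) == 6 and parts[i + 1].isdigit():
--                     time = parts[i + 1]
--         for key, value in (('dataset', dataset), ('model', model),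
--                            ('date', date), ('time', time)):
--             if value is not None:
--                 attributes[key] = value
--
--     attributes['full_folder_name'] = folder_name
--     return attributes
-- ===== Notes on version B (the rewrite author's own statement) =====
-- stated objective: alternative
-- what changed: A's three separate scans over the parts (dataset first-match with break, model first-match with break, date/time loop without break) are merged into one traversal that keeps first-match state for dataset/model and last-match state for date/time, after which the found entries are emitted in a fixed order.
import Mathlib
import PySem

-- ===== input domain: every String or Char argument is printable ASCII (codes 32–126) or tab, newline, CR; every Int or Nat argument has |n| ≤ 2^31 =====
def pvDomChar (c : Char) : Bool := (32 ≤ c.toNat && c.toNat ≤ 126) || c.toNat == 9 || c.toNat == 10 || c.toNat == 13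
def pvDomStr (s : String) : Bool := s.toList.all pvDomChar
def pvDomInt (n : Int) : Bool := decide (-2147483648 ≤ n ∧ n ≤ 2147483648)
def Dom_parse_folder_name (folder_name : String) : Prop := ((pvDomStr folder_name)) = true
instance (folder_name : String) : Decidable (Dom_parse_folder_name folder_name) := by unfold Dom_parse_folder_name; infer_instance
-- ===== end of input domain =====

-- B replaces A's four independent scans over the parts (dataset, model, date, time)
-- by ONE traversal maintaining 'already found' state, then emits the found entries
-- in a fixed order; objective: alternative (same O(n) cost, single pass).

-- s.split('_')  (sep nonempty, so Python's split is Chars.splitOn; exact)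
def pvSplit (s : String) : List String :=
  (PySem.Chars.splitOn s.toList "_".toList).map String.ofList

-- shared constant lists (same literals in both Python sources)
def pvDatasets : List String :=
  ["bloodmnist", "organamnist", "pathmnist", "dermamnist",
   "octmnist", "pneumoniamnist", "retinamnist", "tissuemnist",
   "organsmnist", "organcmnist", "breastmnist", "chestmnist", "siim"]

def pvModels : List String :=
  ["resnet18", "resnet50", "vgg16", "densenet121", "unet", "mobilenet"]

-- any(sub in part.lower() for sub in subs)  (identical expression in both sources)
def pvMatch (subs : List String) (part : String) : Bool :=
  subs.any (fun sub => PySem.Str.isIn sub (PySem.Str.lower part))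

-- ===== PORT A =====

-- A's 'for i, part in enumerate(parts): if any(...): attributes[key] = part; break'
def pvFindLoop (key : String) (subs : List String) :
    List (Int × String) → PySem.Dict String String → PySem.Dict String String
  | [], d => d
  | (_, part) :: rest, d =>
      if pvMatch subs part then d.insert key part
      else pvFindLoop key subs rest d

-- A's date/time loop (no break; later matches overwrite)
def pvDateLoop (parts : List String) :
    List (Int × String) → PySem.Dict String String → PySem.Dict String String
  | [], d => d
  | (i, part) :: rest, d =>
      if PySem.Str.len part = 8 ∧ PySem.Str.strIsdigit part then
        let d1 := d.insert "date" part
        let nxt := PySem.List.pyGetD parts (i + 1) ""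
        let d2 := if i + 1 < PySem.List.len parts ∧ PySem.Str.len nxt = 6 ∧ PySem.Str.strIsdigit nxt
                  then d1.insert "time" nxt else d1
        pvDateLoop parts rest d2
      else pvDateLoop parts rest d

def parse_folder_name (folder_name : String) : List (String × String) :=
  let parts := pvSplit folder_name
  let d0 : PySem.Dict String String := PySem.Dict.empty
  let d1 := if 2 ≤ PySem.List.len parts then
      (d0.insert "prefix" (PySem.List.pyGetD parts 0 "")).insert "type" (PySem.List.pyGetD parts 1 "")
    else d0
  let d2 := (PySem.List.enumerate (PySem.List.slice parts (some 2) none) 2).foldl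
      (fun d p => d.insert ("attribute_" ++ PySem.Int.toStr (p.1 - 1)) p.2) d1
  let d3 := if 4 ≤ PySem.List.len parts then
      pvDateLoop parts (PySem.List.enumerate parts 0)
        (pvFindLoop "model" pvModels (PySem.List.enumerate parts 0)
          (pvFindLoop "dataset" pvDatasets (PySem.List.enumerate parts 0) d2))
    else d2
  (d3.insert "full_folder_name" folder_name).items

-- ===== PORT B =====

-- B's single traversal: state (dataset, model, date, time), first-match guards for
-- dataset/model, last 8-digit part wins for date (with the 6-digit peek for time)
def pvScan (parts : List String) :
    List (Int × String) →
    Option String × Option String × Option String × Option String →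
    Option String × Option String × Option String × Option String
  | [], st => st
  | (i, part) :: rest, (ds, md, dt, tm) =>
      let ds' := if ds.isNone && pvMatch pvDatasets part then some part else ds
      let md' := if md.isNone && pvMatch pvModels part then some part else md
      let dttm :=
        if PySem.Str.len part = 8 ∧ PySem.Str.strIsdigit part then
          let nxt := PySem.List.pyGetD parts (i + 1) ""
          if i + 1 < PySem.List.len parts ∧ PySem.Str.len nxt = 6 ∧ PySem.Str.strIsdigit nxt
          then (some part, some nxt) else (some part, tm)
        else (dt, tm)
      pvScan parts rest (ds', md', dttm.1, dttm.2)

def parse_folder_name_alt (folder_name : String) : List (String × String) :=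
  let parts := pvSplit folder_name
  let d0 : PySem.Dict String String := PySem.Dict.empty
  let d1 := if 2 ≤ PySem.List.len parts then
      (d0.insert "prefix" (PySem.List.pyGetD parts 0 "")).insert "type" (PySem.List.pyGetD parts 1 "")
    else d0
  let d2 := (PySem.List.enumerate (PySem.List.slice parts (some 2) none) 2).foldl
      (fun d p => d.insert ("attribute_" ++ PySem.Int.toStr (p.1 - 1)) p.2) d1
  let d3 := if 4 ≤ PySem.List.len parts then
      let st := pvScan parts (PySem.List.enumerate parts 0) (none, none, none, none)
      [("dataset", st.1), ("model", st.2.1), ("date", st.2.2.1), ("time", st.2.2.2)].foldl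
        (fun d kv => match kv.2 with | some v => d.insert kv.1 v | none => d) d2
    else d2
  (d3.insert "full_folder_name" folder_name).items

-- ===== PRECONDITION & SPEC =====
def Spec_parse_folder_name (folder_name : String) (out : List (String × String)) : Prop := out = parse_folder_name_alt folder_name
instance (folder_name : String) (out : List (String × String)) : Decidable (Spec_parse_folder_name folder_name out) := by unfold Spec_parse_folder_name; infer_instance

-- ===== CLAIM (what is proved, stated in full; the proofs are below) =====
def Claim_equal_parse_folder_name : Prop := ∀ (folder_name : String), Dom_parse_folder_name folder_name → Spec_parse_folder_name folder_name (parse_folder_name folder_name)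

-- ===== LEMMAS AND PROOFS =====

def pvEntry (k : String) : Option String → List (String × String)
  | none => []
  | some v => [(k, v)]

-- attribute_i keys differ from the four pattern keys
theorem pvAttr_ne (s : String) (k : String) (hk : k ∈ (["dataset", "model", "date", "time"] : List String)) :
    ("attribute_" ++ s) ≠ k := by
  fin_cases hk <;>
    (intro h; have := congrArg String.toList h; simp [String.toList_append] at this)

theorem pvNotContains_mk (L : List (String × String)) (k : String)
    (hL : ∀ p ∈ L, p.1 ≠ k) : (PySem.Dict.mk L).contains k = false := by
  simp only [← Bool.not_eq_true, PySem.Dict.contains_iff_mem_keys]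
  intro hmem
  simp only [PySem.Dict.keys, List.mem_map] at hmem
  obtain ⟨p, hp, hp1⟩ := hmem
  exact hL p hp hp1

theorem pvContains_mk_of_mem (L : List (String × String)) (k : String)
    (h : k ∈ L.map Prod.fst) : (PySem.Dict.mk L).contains k = true := by
  rw [PySem.Dict.contains_iff_mem_keys]
  simpa [PySem.Dict.keys, PySem.Dict.items] using h

-- the attribute_i fold never inserts one of the four pattern keys
theorem pvContains_attr_fold (E : List (Int × String)) (d : PySem.Dict String String)
    (k : String) (hk : k ∈ (["dataset", "model", "date", "time"] : List String))
    (h : d.contains k = false) :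
    (E.foldl (fun d p => d.insert ("attribute_" ++ PySem.Int.toStr (p.1 - 1)) p.2) d).contains k
      = false := by
  induction E generalizing d with
  | nil => exact h
  | cons p rest ih =>
      simp only [List.foldl_cons]
      exact ih _ (by simp [PySem.Dict.contains_insert, h,
        (pvAttr_ne (PySem.Int.toStr (p.1 - 1)) k hk).symm])

-- A's break-loop is 'first match, inserted once'
theorem pvFindLoop_eq (key : String) (subs : List String) (E : List (Int × String))
    (d : PySem.Dict String String) :
    pvFindLoop key subs E d =
      match (E.map Prod.snd).find? (pvMatch subs) with
      | some p => d.insert key p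
      | none => d := by
  induction E generalizing d with
  | nil => rfl
  | cons p rest ih =>
      obtain ⟨i, part⟩ := p
      by_cases h : pvMatch subs part
      · simp [pvFindLoop, h]
      · simp only [pvFindLoop, h, if_neg, List.map_cons, List.find?,
          Bool.false_eq_true, not_false_eq_true]
        simp [ih]

-- B's first-match components agree with find?
theorem pvScan_ds (parts : List String) (E : List (Int × String))
    (ds md dt tm : Option String) :
    (pvScan parts E (ds, md, dt, tm)).1 =
      match ds with
      | some x => some x
      | none => (E.map Prod.snd).find? (pvMatch pvDatasets) := by
  induction E generalizing ds md dt tm with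
  | nil => cases ds <;> rfl
  | cons p rest ih =>
      obtain ⟨i, part⟩ := p
      simp only [pvScan]
      cases ds with
      | some x => simp [ih]
      | none =>
          by_cases h : pvMatch pvDatasets part <;>
            simp [h, ih]

theorem pvScan_md (parts : List String) (E : List (Int × String))
    (ds md dt tm : Option String) :
    (pvScan parts E (ds, md, dt, tm)).2.1 =
      match md with
      | some x => some x
      | none => (E.map Prod.snd).find? (pvMatch pvModels) := by
  induction E generalizing ds md dt tm with
  | nil => cases md <;> rfl
  | cons p rest ih =>
      obtain ⟨i, part⟩ := p
      simp only [pvScan]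
      cases md with
      | some x => simp [ih]
      | none =>
          by_cases h : pvMatch pvModels part <;>
            simp [h, ih]

theorem pvEntry_key (k : String) (o : Option String) :
    ∀ p ∈ pvEntry k o, p.1 = k := by
  cases o <;> simp [pvEntry]

theorem pvMapReplace (key v : String) (L1 L2 : List (String × String)) (w : String)
    (h1 : ∀ p ∈ L1, p.1 ≠ key) (h2 : ∀ p ∈ L2, p.1 ≠ key) :
    (L1 ++ [(key, w)] ++ L2).map (fun p => if (p.1 == key) = true then (key, v) else p)
      = L1 ++ [(key, v)] ++ L2 := by
  simp only [List.map_append, List.map_cons, List.map_nil]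
  rw [List.map_congr_left (g := id) (fun p hp => by simp [h1 p hp]), List.map_id,
    List.map_congr_left (g := id) (fun p hp => by simp [h2 p hp]), List.map_id]
  simp

-- A's no-break date/time loop tracks exactly B's (date, time) state
theorem pvDateLoop_items (parts : List String) (E : List (Int × String))
    (L : List (String × String)) (dt tm : Option String)
    (hd : ∀ p ∈ L, p.1 ≠ "date") (ht : ∀ p ∈ L, p.1 ≠ "time")
    (hinv : dt = none → tm = none) (ds md : Option String) :
    (pvDateLoop parts E (PySem.Dict.mk (L ++ pvEntry "date" dt ++ pvEntry "time" tm))).items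
      = L ++ pvEntry "date" (pvScan parts E (ds, md, dt, tm)).2.2.1
          ++ pvEntry "time" (pvScan parts E (ds, md, dt, tm)).2.2.2 := by
  induction E generalizing dt tm ds md with
  | nil => simp [pvDateLoop, pvScan]
  | cons p rest ih =>
      obtain ⟨i, part⟩ := p
      by_cases h8 : PySem.Str.len part = 8 ∧ PySem.Str.strIsdigit part
      · simp only [pvDateLoop, pvScan, h8]
        set nxt := PySem.List.pyGetD parts (i + 1) "" with hnxt
        have hins1 :
            (PySem.Dict.mk (L ++ pvEntry "date" dt ++ pvEntry "time" tm)).insert "date" part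
              = PySem.Dict.mk (L ++ pvEntry "date" (some part) ++ pvEntry "time" tm) := by
          apply PySem.Dict.ext
          cases dt with
          | none =>
              have htm : tm = none := hinv rfl
              subst htm
              have e : L ++ pvEntry "date" (none : Option String)
                  ++ pvEntry "time" (none : Option String) = L := by simp [pvEntry]
              rw [e, PySem.Dict.items_insert_of_not_contains _ _ (pvNotContains_mk L "date" hd)]
              simp [pvEntry]
          | some x =>
              rw [PySem.Dict.items_insert_of_contains _ _
                (pvContains_mk_of_mem _ "date" (by simp [pvEntry]))]
              exact pvMapReplace "date" part L (pvEntry "time" tm) x hd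
                (fun p hp => by rw [pvEntry_key "time" tm p hp]; decide)
        rw [hins1]
        by_cases h6 : i + 1 < PySem.List.len parts ∧ PySem.Str.len nxt = 6 ∧ PySem.Str.strIsdigit nxt
        · simp only [h6]
          have hins2 :
              (PySem.Dict.mk (L ++ pvEntry "date" (some part) ++ pvEntry "time" tm)).insert "time" nxt
                = PySem.Dict.mk (L ++ pvEntry "date" (some part) ++ pvEntry "time" (some nxt)) := by
            apply PySem.Dict.ext
            cases tm with
            | none =>
                have e : L ++ pvEntry "date" (some part)
                    ++ pvEntry "time" (none : Option String)
                    = L ++ pvEntry "date" (some part) := by simp [pvEntry]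
                rw [e, PySem.Dict.items_insert_of_not_contains _ _
                  (pvNotContains_mk _ "time" (by
                    intro p hp
                    rcases List.mem_append.1 hp with hp' | hp'
                    · exact ht p hp'
                    · simp [pvEntry] at hp'; simp [hp']))]
                simp [pvEntry]
            | some y =>
                rw [PySem.Dict.items_insert_of_contains _ _
                  (pvContains_mk_of_mem _ "time" (by simp [pvEntry]))]
                show List.map (fun p => if (p.1 == "time") = true then ("time", nxt) else p)
                    (L ++ pvEntry "date" (some part) ++ pvEntry "time" (some y))
                    = L ++ pvEntry "date" (some part) ++ pvEntry "time" (some nxt)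
                rw [show L ++ pvEntry "date" (some part) ++ pvEntry "time" (some y)
                    = (L ++ [("date", part)]) ++ [("time", y)] ++ [] by simp [pvEntry]]
                rw [pvMapReplace "time" nxt (L ++ [("date", part)]) [] y
                  (fun p hp => by
                    rcases List.mem_append.1 hp with hp' | hp'
                    · exact ht p hp'
                    · simp at hp'; simp [hp'])
                  (by simp)]
                simp [pvEntry]
          rw [hins2]
          exact ih (some part) (some nxt) (by simp) _ _
        · simp only [h6, if_neg, not_false_eq_true]
          exact ih (some part) tm (by simp) _ _
      · simp only [pvDateLoop, pvScan, h8, if_neg, not_false_eq_true]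
        exact ih dt tm hinv _ _

-- items of an optional insert with a fresh key
theorem pvInsertOpt_items (d : PySem.Dict String String) (k : String) (o : Option String)
    (h : d.contains k = false) :
    (match o with | some v => d.insert k v | none => d).items = d.items ++ pvEntry k o := by
  cases o with
  | none => simp [pvEntry]
  | some v => simp [PySem.Dict.items_insert_of_not_contains d v h, pvEntry]

theorem pvInsertOpt_contains (d : PySem.Dict String String) (k k' : String) (o : Option String)
    (hne : k' ≠ k) (h : d.contains k' = false) :
    (match o with | some v => d.insert k v | none => d).contains k' = false := by
  cases o with
  | none => exact h
  | some v => simp [PySem.Dict.contains_insert, hne, h]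

theorem pvMem_keys_mk_append (L : List (String × String)) (e : List (String × String))
    (k : String) (hL : ∀ p ∈ L, p.1 ≠ k) (he : ∀ p ∈ e, p.1 ≠ k) :
    (PySem.Dict.mk (L ++ e)).contains k = false := by
  apply pvNotContains_mk
  intro p hp
  rcases List.mem_append.1 hp with h | h
  · exact hL p h
  · exact he p h

-- ===== VERDICT (by name: the statement is the Claim_ definition above) =====
theorem parse_folder_name_spec : Claim_equal_parse_folder_name := by
  intro folder_name _
  unfold Spec_parse_folder_name parse_folder_name parse_folder_name_alt
  simp only []
  set parts := pvSplit folder_name with hparts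
  set d2 := (PySem.List.enumerate (PySem.List.slice parts (some 2) none) 2).foldl
      (fun d p => d.insert ("attribute_" ++ PySem.Int.toStr (p.1 - 1)) p.2)
      (if 2 ≤ PySem.List.len parts then
        ((PySem.Dict.empty : PySem.Dict String String).insert "prefix"
            (PySem.List.pyGetD parts 0 "")).insert "type" (PySem.List.pyGetD parts 1 "")
      else PySem.Dict.empty) with hd2
  have hc : ∀ k ∈ (["dataset", "model", "date", "time"] : List String),
      d2.contains k = false := by
    intro k hk
    apply pvContains_attr_fold _ _ k hk
    have hpre : k ≠ "prefix" ∧ k ≠ "type" := by fin_cases hk <;> exact ⟨by decide, by decide⟩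
    split <;> simp [PySem.Dict.contains_insert, hpre.1, hpre.2]
  by_cases h4 : 4 ≤ PySem.List.len parts
  · simp only [h4, if_pos]
    set E := PySem.List.enumerate parts 0 with hE
    set st := pvScan parts E (none, none, none, none) with hst
    -- A side: dataset then model loops append their first matches
    set fds := (E.map Prod.snd).find? (pvMatch pvDatasets) with hfds
    set fmd := (E.map Prod.snd).find? (pvMatch pvModels) with hfmd
    have hA1 : pvFindLoop "dataset" pvDatasets E d2 =
        PySem.Dict.mk (d2.items ++ pvEntry "dataset" fds) := by
      rw [pvFindLoop_eq]
      apply PySem.Dict.ext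
      rw [← hfds]
      cases fds with
      | none => simp [pvEntry]
      | some p =>
          simp [PySem.Dict.items_insert_of_not_contains d2 p (hc "dataset" (by simp)), pvEntry]
    have hkeys_d2 : ∀ k ∈ (["dataset", "model", "date", "time"] : List String),
        ∀ p ∈ d2.items, p.1 ≠ k := by
      intro k hk p hp h1
      have := (PySem.Dict.contains_iff_mem_keys d2 k).2
        (by simp only [PySem.Dict.keys]; exact List.mem_map.2 ⟨p, hp, h1⟩)
      rw [hc k hk] at this; exact absurd this (by simp)
    have hA2 : pvFindLoop "model" pvModels E (pvFindLoop "dataset" pvDatasets E d2) =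
        PySem.Dict.mk (d2.items ++ pvEntry "dataset" fds ++ pvEntry "model" fmd) := by
      rw [hA1, pvFindLoop_eq]
      apply PySem.Dict.ext
      rw [← hfmd]
      cases fmd with
      | none => simp [pvEntry]
      | some p =>
          rw [PySem.Dict.items_insert_of_not_contains]
          · simp [pvEntry]
          · apply pvMem_keys_mk_append
            · exact hkeys_d2 "model" (by simp)
            · intro q hq; rw [pvEntry_key "dataset" fds q hq]; decide
    -- A side: date loop on that dict tracks B's scan state
    have hA3 := pvDateLoop_items parts E (d2.items ++ pvEntry "dataset" fds ++ pvEntry "model" fmd)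
        none none
        (by intro p hp
            rcases List.mem_append.1 hp with hp' | hp'
            · rcases List.mem_append.1 hp' with hp'' | hp''
              · exact hkeys_d2 "date" (by simp) p hp''
              · rw [pvEntry_key "dataset" fds p hp'']; decide
            · rw [pvEntry_key "model" fmd p hp']; decide)
        (by intro p hp
            rcases List.mem_append.1 hp with hp' | hp'
            · rcases List.mem_append.1 hp' with hp'' | hp''
              · exact hkeys_d2 "time" (by simp) p hp''
              · rw [pvEntry_key "dataset" fds p hp'']; decide
            · rw [pvEntry_key "model" fmd p hp']; decide)
        (fun _ => rfl) none none
    -- B side: the four-entry fold appends the found entries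
    have hds : st.1 = fds := by rw [hst, pvScan_ds, hfds]
    have hmd : st.2.1 = fmd := by rw [hst, pvScan_md, hfmd]
    have hc1 : d2.contains "dataset" = false := hc "dataset" (by simp)
    have hc2 : d2.contains "model" = false := hc "model" (by simp)
    have hc3 : d2.contains "date" = false := hc "date" (by simp)
    have hc4 : d2.contains "time" = false := hc "time" (by simp)
    have hB :
        ([("dataset", st.1), ("model", st.2.1), ("date", st.2.2.1), ("time", st.2.2.2)].foldl
          (fun d kv => match kv.2 with | some v => d.insert kv.1 v | none => d) d2).items
        = d2.items ++ pvEntry "dataset" st.1 ++ pvEntry "model" st.2.1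
            ++ pvEntry "date" st.2.2.1 ++ pvEntry "time" st.2.2.2 := by
      simp only [List.foldl_cons, List.foldl_nil]
      rw [pvInsertOpt_items _ "time" _
            (pvInsertOpt_contains _ _ _ _ (by decide)
              (pvInsertOpt_contains _ _ _ _ (by decide)
                (pvInsertOpt_contains _ _ _ _ (by decide) hc4))),
          pvInsertOpt_items _ "date" _
            (pvInsertOpt_contains _ _ _ _ (by decide)
              (pvInsertOpt_contains _ _ _ _ (by decide) hc3)),
          pvInsertOpt_items _ "model" _
            (pvInsertOpt_contains _ _ _ _ (by decide) hc2),
          pvInsertOpt_items _ "dataset" _ hc1]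
    -- combine
    have hAB :
        pvDateLoop parts E
          (pvFindLoop "model" pvModels E (pvFindLoop "dataset" pvDatasets E d2))
        = ([("dataset", st.1), ("model", st.2.1), ("date", st.2.2.1), ("time", st.2.2.2)].foldl
            (fun d kv => match kv.2 with | some v => d.insert kv.1 v | none => d) d2) := by
      apply PySem.Dict.ext
      rw [hA2, hB, hds, hmd]
      rw [show (PySem.Dict.mk (d2.items ++ pvEntry "dataset" fds ++ pvEntry "model" fmd))
            = PySem.Dict.mk ((d2.items ++ pvEntry "dataset" fds ++ pvEntry "model" fmd)
                ++ pvEntry "date" none ++ pvEntry "time" none) by simp [pvEntry]]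
      rw [hA3]
    rw [hAB]
  · simp only [h4, if_neg, not_false_eq_true]
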